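-- pv_equiv track=rewrite | github.com/zhouby-zjl/hps | controller.py | gen_candidate_ecmp_values
-- ===== SOURCE A (Python) =====
-- import itertools
--
-- def gen_candidate_ecmp_values(bm_te, p):
--     cands = []
--     for t in range(p):
--         c = []
--         for r in range(p):
--             b = bm_te[r] & (1 << r)
--             if b != 0:
--                 c.append(b)
--         cands.append(c)
--
--     xc = []
--     for lst in cands:
--         combinations = lst[:]
--         for r in range(2, len(lst) + 1):
--             for combo in itertools.combinations(lst, r):
--                 xor_result = 0
--                 for num in combo:
--                     xor_result ^= num
--                 combinations.append(xor_result)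
--         xc.append(combinations)
--
--     index_combinations = itertools.product(*[range(len(lst)) for lst in xc])
--
--     Y = []
--     for indices in index_combinations:
--         xor_result = 0
--         for i, idx in enumerate(indices):
--             xor_result ^= xc[i][idx]
--         Y.append(xor_result)
--
--     return Y
-- ===== SOURCE B (Python) =====
-- def gen_candidate_ecmp_values(bm_te, p):
--     # The p per-position candidate lists A builds are identical, so build the
--     # candidate-bit list once; generate the subset XORs by direct recursion
--     # (no itertools, no materialized tuples); index the p-fold product
--     # arithmetically: output j's base-m digits name the factors it XORs.
--     c = []
--     for r in range(p):
--         b = bm_te[r] & (1 << r)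
--         if b != 0:
--             c.append(b)
--
--     xcs = []
--     for r in range(1, len(c) + 1):
--         xcs.extend(_combo_xors(c, r))
--
--     m = len(xcs)
--     Y = []
--     for j in range(m ** max(p, 0)):
--         x, q = 0, j
--         for _ in range(p):
--             q, d = divmod(q, m)
--             x ^= xcs[d]
--         Y.append(x)
--     return Y
--
--
-- def _combo_xors(lst, r):
--     # XOR of every r-element subset of lst, in lexicographic index order,
--     # computed recursively without building the subsets themselves.
--     if r == 0:
--         return [0]
--     if not lst:
--         return []
--     head, tail = lst[0], lst[1:]
--     return [head ^ y for y in _combo_xors(tail, r - 1)] + _combo_xors(tail, r)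
-- ===== Notes on version B (the rewrite author's own statement) =====
-- stated objective: alternative
-- what changed: B drops itertools entirely: the candidate list is built once (A builds p identical copies), the subset XORs are produced by a direct structural recursion instead of enumerating itertools.combinations tuples and XOR-folding each, and the p-fold product is never enumerated as index tuples - each output j is computed from the base-m digits of j by divmod.
import Mathlib
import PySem

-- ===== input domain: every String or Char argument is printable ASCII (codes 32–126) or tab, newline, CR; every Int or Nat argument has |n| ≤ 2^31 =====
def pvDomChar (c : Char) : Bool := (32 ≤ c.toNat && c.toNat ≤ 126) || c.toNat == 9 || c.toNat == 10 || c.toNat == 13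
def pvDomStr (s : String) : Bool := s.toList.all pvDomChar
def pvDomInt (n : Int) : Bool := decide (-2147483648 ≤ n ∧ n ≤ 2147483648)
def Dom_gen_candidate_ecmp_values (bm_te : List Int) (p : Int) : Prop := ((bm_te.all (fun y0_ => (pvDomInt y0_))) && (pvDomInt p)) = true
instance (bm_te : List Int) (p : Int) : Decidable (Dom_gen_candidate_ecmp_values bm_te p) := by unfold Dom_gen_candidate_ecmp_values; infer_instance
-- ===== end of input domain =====

-- B builds the candidate list once (A builds p identical copies), produces the subset
-- XORs by a direct structural recursion instead of itertools.combinations plus a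
-- per-tuple XOR fold, and never enumerates the index product: output j is computed
-- from the base-m digits of j by divmod.

-- ===== PORT A =====
-- itertools.product(*lists): rightmost factor varies fastest (exact transliteration)
def pyProduct (ls : List (List Int)) : List (List Int) :=
  ls.foldr (fun l acc => l.flatMap (fun x => acc.map (x :: ·))) [[]]

def gen_candidate_ecmp_values (bm_te : List Int) (p : Int) : List Int :=
  let cands : List (List Int) :=
    (PySem.List.pyRange 0 p 1).foldl (fun cands _t =>
      let c : List Int :=
        (PySem.List.pyRange 0 p 1).foldl (fun c r =>
          let b := PySem.Int.band (PySem.List.pyGetD bm_te r 0) ((1 : Int) <<< r.toNat)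
          if b ≠ 0 then c ++ [b] else c) []
      cands ++ [c]) []
  let xc : List (List Int) :=
    cands.foldl (fun xc lst =>
      let combinations :=
        (PySem.List.pyRange 2 ((lst.length : Int) + 1) 1).foldl (fun combs r =>
          (PySem.List.combinations lst r.toNat).foldl (fun combs combo =>
            let xor_result := combo.foldl (fun acc num => PySem.Int.bxor acc num) 0
            combs ++ [xor_result]) combs) lst
      xc ++ [combinations]) []
  let index_combinations : List (List Int) :=
    pyProduct (xc.map (fun lst => PySem.List.pyRange 0 (lst.length : Int) 1))
  index_combinations.foldl (fun Y indices =>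
    let xor_result := (PySem.List.enumerate indices 0).foldl
      (fun acc pr => PySem.Int.bxor acc
        (PySem.List.pyGetD (PySem.List.pyGetD xc pr.1 []) pr.2 0)) 0
    Y ++ [xor_result]) []

-- ===== PORT B =====
-- helper _combo_xors of Source B: XOR of every r-subset, by structural recursion
def pvComboXors (lst : List Int) (r : Nat) : List Int :=
  match r, lst with
  | 0, _ => [0]
  | _ + 1, [] => []
  | r + 1, x :: xs =>
      (pvComboXors xs r).map (fun y => PySem.Int.bxor x y) ++ pvComboXors xs (r + 1)

def gen_candidate_ecmp_values_alt (bm_te : List Int) (p : Int) : List Int :=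
  let c : List Int :=
    (PySem.List.pyRange 0 p 1).foldl (fun c r =>
      let b := PySem.Int.band (PySem.List.pyGetD bm_te r 0) ((1 : Int) <<< r.toNat)
      if b ≠ 0 then c ++ [b] else c) []
  let xcs : List Int :=
    (PySem.List.pyRange 1 ((c.length : Int) + 1) 1).foldl
      (fun acc r => acc ++ pvComboXors c r.toNat) []
  let m : Int := (xcs.length : Int)
  (PySem.List.pyRange 0 (m ^ (max p 0).toNat) 1).foldl (fun Y j =>
    let xq := (PySem.List.pyRange 0 p 1).foldl
      (fun (st : Int × Int) _ =>
        (PySem.Int.bxor st.1 (PySem.List.pyGetD xcs (PySem.Int.mod st.2 m) 0),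
         PySem.Int.floordiv st.2 m)) (0, j)
    Y ++ [xq.1]) []

-- ===== PRECONDITION & SPEC =====
-- A indexes bm_te[r] for r in range(p): it raises IndexError exactly when p > len(bm_te).
def Pre_gen_candidate_ecmp_values (bm_te : List Int) (p : Int) : Prop :=
  p ≤ (bm_te.length : Int)
instance (bm_te : List Int) (p : Int) : Decidable (Pre_gen_candidate_ecmp_values bm_te p) := by
  unfold Pre_gen_candidate_ecmp_values; infer_instance

def pvWitness_gen_candidate_ecmp_values : List Int × Int := ([3, 2], 2)

def Spec_gen_candidate_ecmp_values (bm_te : List Int) (p : Int) (out : List Int) : Prop := out = gen_candidate_ecmp_values_alt bm_te p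
instance (bm_te : List Int) (p : Int) (out : List Int) : Decidable (Spec_gen_candidate_ecmp_values bm_te p out) := by unfold Spec_gen_candidate_ecmp_values; infer_instance

-- ===== CLAIM (what is proved, stated in full; the proofs are below) =====
def Claim_equal_gen_candidate_ecmp_values : Prop := ∀ (bm_te : List Int) (p : Int), Dom_gen_candidate_ecmp_values bm_te p → Pre_gen_candidate_ecmp_values bm_te p → Spec_gen_candidate_ecmp_values bm_te p (gen_candidate_ecmp_values bm_te p)

-- ===== LEMMAS AND PROOFS =====

theorem pv_bxor_eq_xor (a b : Int) : PySem.Int.bxor a b = Int.xor a b := by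
  unfold PySem.Int.bxor
  rcases a with m | m <;> rcases b with n | n <;>
    simp [Int.xor, Int.negSucc_eq] <;> omega

theorem pv_bxor_assoc (a b c : Int) :
    PySem.Int.bxor (PySem.Int.bxor a b) c = PySem.Int.bxor a (PySem.Int.bxor b c) := by
  simp only [pv_bxor_eq_xor]
  rcases a with m | m <;> rcases b with n | n <;> rcases c with k | k <;>
    simp [Int.xor, Nat.xor_assoc]

theorem pv_bxor_zero_left (a : Int) : PySem.Int.bxor 0 a = a := by
  rw [PySem.Int.bxor_comm]; exact PySem.Int.bxor_zero a

-- one expansion round (proof-side view of one factor of the product)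
def pvExpand (S Y : List Int) : List Int :=
  Y.flatMap (fun y => S.map (fun x => PySem.Int.bxor y x))

theorem pv_expand_fold_shift (S : List Int) : ∀ (ts : List Int) (init : List Int),
    ts.foldl (fun Y _ => pvExpand S Y) init =
      init.flatMap (fun y => (ts.foldl (fun Y _ => pvExpand S Y) [0]).map
        (fun x => PySem.Int.bxor y x)) := by
  intro ts
  induction ts with
  | nil =>
    intro init
    simp [PySem.Int.bxor_zero]
  | cons t ts ih =>
    intro init
    simp only [List.foldl_cons]
    rw [ih (pvExpand S init), ih (pvExpand S [0])]
    simp [pvExpand, pv_bxor_zero_left, List.flatMap_assoc, List.flatMap_map,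
      List.map_flatMap, List.map_map, Function.comp_def, pv_bxor_assoc]

-- XOR-accumulating fold: pull the accumulator out front
theorem pv_foldl_bxor_acc {α : Type} (g : α → Int) : ∀ (l : List α) (acc : Int),
    l.foldl (fun a x => PySem.Int.bxor a (g x)) acc =
      PySem.Int.bxor acc (l.foldl (fun a x => PySem.Int.bxor a (g x)) 0) := by
  intro l
  induction l with
  | nil => intro acc; simp [PySem.Int.bxor_zero]
  | cons x l ih =>
    intro acc
    simp only [List.foldl_cons]
    rw [ih (PySem.Int.bxor acc (g x)), ih (PySem.Int.bxor 0 (g x)),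
      pv_bxor_zero_left, pv_bxor_assoc]

theorem pv_foldl_bxor_acc' (l : List Int) (acc : Int) :
    l.foldl (fun a x => PySem.Int.bxor a x) acc =
      PySem.Int.bxor acc (l.foldl (fun a x => PySem.Int.bxor a x) 0) :=
  pv_foldl_bxor_acc (fun x => x) l acc

-- the lookup fold ignores the head list once the enumeration starts at k+1
theorem pv_enum_shift (S : List Int) (xc : List (List Int)) :
    ∀ (idxs : List Int) (k : Nat) (acc : Int),
    (PySem.List.enumerate idxs ((k : Int) + 1)).foldl
        (fun a pr => PySem.Int.bxor a
          (PySem.List.pyGetD (PySem.List.pyGetD (S :: xc) pr.1 []) pr.2 0)) acc =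
      (PySem.List.enumerate idxs (k : Int)).foldl
        (fun a pr => PySem.Int.bxor a
          (PySem.List.pyGetD (PySem.List.pyGetD xc pr.1 []) pr.2 0)) acc := by
  intro idxs
  induction idxs with
  | nil => intro k acc; simp [PySem.List.enumerate]
  | cons i is ih =>
    intro k acc
    rw [PySem.List.enumerate_cons, PySem.List.enumerate_cons]
    simp only [List.foldl_cons]
    have h1 : ((k : Int) + 1) = ((k + 1 : Nat) : Int) := by push_cast; ring
    rw [h1, ih (k + 1)]
    congr 1
    simp only [PySem.List.pyGetD_natCast]
    simp

-- A's per-tuple XOR accumulator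
def pvTupleXor (xc : List (List Int)) (indices : List Int) : Int :=
  (PySem.List.enumerate indices 0).foldl
    (fun acc pr => PySem.Int.bxor acc
      (PySem.List.pyGetD (PySem.List.pyGetD xc pr.1 []) pr.2 0)) 0

theorem pv_tupleXor_cons (S : List Int) (xc : List (List Int)) (j : Int) (idxs : List Int) :
    pvTupleXor (S :: xc) (j :: idxs) =
      PySem.Int.bxor (PySem.List.pyGetD S j 0) (pvTupleXor xc idxs) := by
  unfold pvTupleXor
  rw [PySem.List.enumerate_cons]
  simp only [List.foldl_cons]
  have h0 : (0 : Int) + 1 = ((0 : Nat) : Int) + 1 := by norm_num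
  rw [h0, pv_enum_shift]
  rw [pv_foldl_bxor_acc
    (fun pr : Int × Int => PySem.List.pyGetD (PySem.List.pyGetD xc pr.1 []) pr.2 0)]
  simp [PySem.List.pyGetD_zero_cons, pv_bxor_zero_left]

-- the index-product pass over p copies of S equals the round-by-round expansion
theorem pv_main (S : List Int) : ∀ (ts : List Int),
    (pyProduct ((ts.map (fun _ => S)).map
        (fun lst => PySem.List.pyRange 0 (lst.length : Int) 1))).map
        (pvTupleXor (ts.map (fun _ => S))) =
      ts.foldl (fun Y _ => pvExpand S Y) [0] := by
  intro ts
  induction ts with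
  | nil => simp [pyProduct, pvTupleXor, PySem.List.enumerate]
  | cons t ts ih =>
    simp only [List.map_cons, List.foldl_cons]
    have hprod : ∀ (l : List Int) (ls : List (List Int)),
        pyProduct (l :: ls) = l.flatMap (fun x => (pyProduct ls).map (x :: ·)) := by
      intro l ls; rfl
    rw [hprod]
    rw [pv_expand_fold_shift S ts (pvExpand S [0])]
    have hS0 : pvExpand S [0] = S := by
      simp [pvExpand, pv_bxor_zero_left]
    rw [hS0, ← ih]
    simp only [List.map_flatMap, List.map_map, Function.comp_def, pv_tupleXor_cons]
    have key : ∀ (F : Int → List Int),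
        (PySem.List.pyRange 0 (S.length : Int) 1).flatMap
            (fun j => F (PySem.List.pyGetD S j 0)) =
          S.flatMap F := by
      intro F
      conv_rhs => rw [← PySem.List.map_pyGetD_pyRange_zero' (xs := S) (d := 0)]
      rw [List.flatMap_map]
    exact key (fun y =>
      (pyProduct (ts.map (fun _ => PySem.List.pyRange 0 (S.length : Int) 1))).map
        (fun x => PySem.Int.bxor y (pvTupleXor (ts.map (fun _ => S)) x)))

-- B's recursive subset-XOR generator computes A's combinations-then-fold values
theorem pv_comboXors_eq : ∀ (lst : List Int) (r : Nat),
    pvComboXors lst r = (PySem.List.combinations lst r).map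
      (List.foldl (fun acc num => PySem.Int.bxor acc num) 0) := by
  intro lst
  induction lst with
  | nil =>
    intro r
    cases r with
    | zero => simp [pvComboXors, PySem.List.combinations_zero]
    | succ r => simp [pvComboXors, PySem.List.combinations_nil_succ]
  | cons x xs ih =>
    intro r
    cases r with
    | zero => simp [pvComboXors, PySem.List.combinations_zero]
    | succ r =>
      rw [PySem.List.combinations_cons_succ]
      simp only [pvComboXors, ih r, ih (r + 1), List.map_append, List.map_map,
        Function.comp_def]
      congr 1
      apply List.map_congr_left
      intro cmb _
      simp only [List.foldl_cons]
      rw [pv_foldl_bxor_acc' cmb (PySem.Int.bxor 0 x), pv_bxor_zero_left]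

-- A's per-list combination pass (sizes 2..n appended after lst itself) is the
-- single flatMap over sizes 1..n
theorem pv_chunk (lst : List Int) :
    lst ++ (PySem.List.pyRange 2 ((lst.length : Int) + 1) 1).flatMap (fun r =>
        (PySem.List.combinations lst r.toNat).map
          (List.foldl (fun acc num => PySem.Int.bxor acc num) 0)) =
      (PySem.List.pyRange 1 ((lst.length : Int) + 1) 1).flatMap (fun r =>
        (PySem.List.combinations lst r.toNat).map
          (List.foldl (fun acc num => PySem.Int.bxor acc num) 0)) := by
  by_cases h : lst.length = 0
  · rw [List.length_eq_zero_iff] at h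
    subst h
    simp [PySem.List.pyRange_one_eq_nil]
  · have h1 : (1 : Int) < (lst.length : Int) + 1 := by
      have : 0 < lst.length := Nat.pos_of_ne_zero h
      omega
    rw [PySem.List.pyRange_one_cons h1]
    rw [List.flatMap_cons]
    have hone : (PySem.List.combinations lst (1 : Int).toNat).map
        (List.foldl (fun acc num => PySem.Int.bxor acc num) 0) = lst := by
      norm_num [PySem.List.combinations_one, List.map_map, Function.comp_def,
        pv_bxor_zero_left]
    rw [hone]
    norm_num

-- a loop that ignores its elements is function iteration
theorem pv_foldl_ignore_iterate {α β : Type} (f : β → β) (l : List α) (init : β) :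
    l.foldl (fun acc _ => f acc) init = f^[l.length] init := by
  induction l generalizing init with
  | nil => rfl
  | cons x xs ih => simp [List.foldl_cons, ih, Function.iterate_succ_apply]

-- one divmod step of B's digit loop
def pvStep (S : List Int) (st : Int × Int) : Int × Int :=
  (PySem.Int.bxor st.1 (PySem.List.pyGetD S (PySem.Int.mod st.2 (S.length : Int)) 0),
   PySem.Int.floordiv st.2 (S.length : Int))

-- the XOR accumulator of the digit loop factors out front
theorem pv_step_acc (S : List Int) : ∀ (k : Nat) (x0 q : Int),
    (pvStep S)^[k] (x0, q) =
      (PySem.Int.bxor x0 (((pvStep S)^[k] (0, q)).1), ((pvStep S)^[k] (0, q)).2) := by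
  intro k
  induction k with
  | zero => intro x0 q; simp [PySem.Int.bxor_zero]
  | succ k ih =>
    intro x0 q
    rw [Function.iterate_succ_apply, Function.iterate_succ_apply]
    show (pvStep S)^[k] (pvStep S (x0, q)) = _
    rw [pvStep]
    rw [ih (PySem.Int.bxor x0 (PySem.List.pyGetD S (PySem.Int.mod q (S.length : Int)) 0))]
    have h2 : pvStep S (0, q) =
        (PySem.Int.bxor 0 (PySem.List.pyGetD S (PySem.Int.mod q (S.length : Int)) 0),
         PySem.Int.floordiv q (S.length : Int)) := rfl
    rw [h2, pv_bxor_zero_left,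
      ih (PySem.List.pyGetD S (PySem.Int.mod q (S.length : Int)) 0), pv_bxor_assoc]

-- range(a*b) splits into a blocks of b (the mixed-radix block decomposition)
theorem pv_range_mul (b : Nat) : ∀ (a : Nat),
    PySem.List.pyRange 0 ((a * b : Nat) : Int) 1 =
      (PySem.List.pyRange 0 (a : Int) 1).flatMap
        (fun q => (PySem.List.pyRange 0 (b : Int) 1).map (fun d => q * (b : Int) + d)) := by
  intro a
  induction a with
  | zero => simp [PySem.List.pyRange_zero_nat]
  | succ a ih =>
    have hsplit : PySem.List.pyRange 0 (((a + 1) * b : Nat) : Int) 1 =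
        PySem.List.pyRange 0 ((a * b : Nat) : Int) 1 ++
          PySem.List.pyRange ((a * b : Nat) : Int) (((a + 1) * b : Nat) : Int) 1 := by
      apply PySem.List.pyRange_one_append <;> push_cast <;> nlinarith
    rw [hsplit, show ((a + 1 : Nat) : Int) = (a : Int) + 1 by push_cast; ring,
      PySem.List.pyRange_one_succ_right (by positivity), List.flatMap_append, ih]
    congr 1
    simp only [List.flatMap_cons, List.flatMap_nil, List.append_nil]
    rw [PySem.List.pyRange_one, PySem.List.pyRange_one]
    simp only [List.map_map, Function.comp_def]
    rw [show (((a + 1) * b : Nat) : Int) - ((a * b : Nat) : Int) = ((b : Nat) : Int) by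
      push_cast; ring]
    simp only [sub_zero, Int.toNat_natCast]
    apply List.map_congr_left
    intro k _
    push_cast
    ring

-- B's digit-indexed pass over range(m^k) equals k expansion rounds
theorem pv_digits (S : List Int) : ∀ (k : Nat),
    (PySem.List.pyRange 0 ((S.length ^ k : Nat) : Int) 1).map
        (fun j => ((pvStep S)^[k] (0, j)).1) =
      (pvExpand S)^[k] [0] := by
  intro k
  induction k with
  | zero =>
    simp only [pow_zero, Nat.cast_one, Function.iterate_zero, id]
    have h01 : PySem.List.pyRange 0 1 1 = [0] := by
      have h := PySem.List.pyRange_one_singleton (0 : Int)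
      simpa using h
    rw [h01]
    rfl
  | succ k ih =>
    by_cases hS : S.length = 0
    · have hnil : S = [] := List.length_eq_zero_iff.mp hS
      subst hnil
      rw [Function.iterate_succ_apply']
      simp [pvExpand, pow_succ]
    · have hpos : 0 < ((S.length : Nat) : Int) := by positivity
      have hpow : (S.length ^ (k + 1) : Nat) = S.length ^ k * S.length := by ring
      rw [hpow, pv_range_mul, Function.iterate_succ_apply', ← ih]
      unfold pvExpand
      rw [List.map_flatMap, List.flatMap_map]
      apply List.flatMap_congr
      intro q hq
      rw [PySem.List.mem_pyRange_one] at hq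
      set v : Int := ((pvStep S)^[k] (0, q)).1 with hv
      have hstep1 : ∀ d ∈ PySem.List.pyRange 0 ((S.length : Nat) : Int) 1,
          ((pvStep S)^[k + 1] (0, q * ((S.length : Nat) : Int) + d)).1 =
            PySem.Int.bxor v (PySem.List.pyGetD S d 0) := by
        intro d hd
        rw [PySem.List.mem_pyRange_one] at hd
        rw [Function.iterate_succ_apply]
        have hmod : PySem.Int.mod (q * ((S.length : Nat) : Int) + d) ((S.length : Nat) : Int) = d := by
          rw [PySem.Int.mod_eq_emod_of_pos hpos,
            show q * ((S.length : Nat) : Int) + d = d + q * ((S.length : Nat) : Int) by ring,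
            Int.add_mul_emod_self_right]
          exact Int.emod_eq_of_lt hd.1 hd.2
        have hdiv : PySem.Int.floordiv (q * ((S.length : Nat) : Int) + d) ((S.length : Nat) : Int) = q := by
          rw [PySem.Int.floordiv_eq_ediv_of_pos hpos,
            show q * ((S.length : Nat) : Int) + d = d + q * ((S.length : Nat) : Int) by ring,
            Int.add_mul_ediv_right _ _ (by omega : ((S.length : Nat) : Int) ≠ 0),
            Int.ediv_eq_zero_of_lt hd.1 hd.2]
          ring
        have hqd : pvStep S (0, q * ((S.length : Nat) : Int) + d) =
            (PySem.List.pyGetD S d 0, q) := by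
          unfold pvStep
          rw [hmod, hdiv, pv_bxor_zero_left]
        rw [hqd, pv_step_acc]
        exact PySem.Int.bxor_comm _ _
      rw [List.map_map]
      simp only [Function.comp_def]
      rw [List.map_congr_left hstep1]
      conv_rhs => rw [← PySem.List.map_pyGetD_pyRange_zero' (xs := S) (d := (0 : Int))]
      rw [List.map_map]
      simp only [Function.comp_def]

-- bridge: pv_main with A's inline tuple-XOR lambda
theorem pv_final (S : List Int) (ts : List Int) :
    (pyProduct (ts.map (fun _ => PySem.List.pyRange 0 (S.length : Int) 1))).map
        (fun x => (PySem.List.enumerate x 0).foldl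
          (fun acc pr => PySem.Int.bxor acc
            (PySem.List.pyGetD (PySem.List.pyGetD (ts.map (fun _ => S)) pr.1 []) pr.2 0)) 0) =
      ts.foldl (fun Y _ => Y.flatMap (fun y => S.map (fun x => PySem.Int.bxor y x))) [0] := by
  have hm := pv_main S ts
  simp only [pvExpand, List.map_map, Function.comp_def] at hm
  exact hm

-- bridge: B's divmod digit pass equals the same expansion rounds
theorem pv_final2 (S : List Int) (p : Int) :
    (PySem.List.pyRange 0 ((S.length : Int) ^ (max p 0).toNat) 1).map
      (fun j => ((PySem.List.pyRange 0 p 1).foldl (fun (st : Int × Int) _ =>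
          (PySem.Int.bxor st.1 (PySem.List.pyGetD S (PySem.Int.mod st.2 (S.length : Int)) 0),
           PySem.Int.floordiv st.2 (S.length : Int))) (0, j)).1) =
    (PySem.List.pyRange 0 p 1).foldl
      (fun Y _ => Y.flatMap (fun y => S.map (fun x => PySem.Int.bxor y x))) [0] := by
  have hk : (max p 0).toNat = p.toNat := by omega
  have hlen : (PySem.List.pyRange 0 p 1).length = p.toNat := by
    rw [PySem.List.length_pyRange_one]; omega
  have hstep : (fun j : Int => ((PySem.List.pyRange 0 p 1).foldl (fun (st : Int × Int) _ =>
          (PySem.Int.bxor st.1 (PySem.List.pyGetD S (PySem.Int.mod st.2 (S.length : Int)) 0),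
           PySem.Int.floordiv st.2 (S.length : Int))) (0, j)).1) =
      (fun j : Int => ((pvStep S)^[p.toNat] (0, j)).1) := by
    funext j
    rw [show (fun (st : Int × Int) (_ : Int) =>
          (PySem.Int.bxor st.1 (PySem.List.pyGetD S (PySem.Int.mod st.2 (S.length : Int)) 0),
           PySem.Int.floordiv st.2 (S.length : Int))) =
        (fun (st : Int × Int) (_ : Int) => pvStep S st) from rfl]
    rw [pv_foldl_ignore_iterate, hlen]
  have hexp : (PySem.List.pyRange 0 p 1).foldl
      (fun Y _ => Y.flatMap (fun y => S.map (fun x => PySem.Int.bxor y x))) [0] =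
      (pvExpand S)^[p.toNat] [0] := by
    rw [show (fun (Y : List Int) (_ : Int) =>
          Y.flatMap (fun y => S.map (fun x => PySem.Int.bxor y x))) =
        (fun (Y : List Int) (_ : Int) => pvExpand S Y) from rfl]
    rw [pv_foldl_ignore_iterate, hlen]
  have hcast : ((S.length : Int)) ^ (max p 0).toNat = ((S.length ^ p.toNat : Nat) : Int) := by
    rw [hk]; push_cast; ring
  rw [hstep, hexp, hcast]
  exact pv_digits S p.toNat

-- ===== VERDICT (by name: the statement is the Claim_ definition above) =====
theorem gen_candidate_ecmp_values_spec : Claim_equal_gen_candidate_ecmp_values := by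
  intro bm_te p _hdom _hpre
  unfold Spec_gen_candidate_ecmp_values
  simp only [gen_candidate_ecmp_values, gen_candidate_ecmp_values_alt]
  simp only [PySem.List.foldl_append_singleton_eq_map, List.nil_append]
  simp only [PySem.List.foldl_append_eq_flatMap, List.nil_append]
  simp only [List.map_map, Function.comp_def]
  simp only [pv_comboXors_eq]
  rw [pv_chunk ((PySem.List.pyRange 0 p 1).foldl (fun c r =>
      if PySem.Int.band (PySem.List.pyGetD bm_te r 0) ((1 : Int) <<< r.toNat) ≠ 0 then
        c ++ [PySem.Int.band (PySem.List.pyGetD bm_te r 0) ((1 : Int) <<< r.toNat)]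
      else c) [])]
  rw [pv_final, pv_final2]
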